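-- pv_equiv track=rewrite | github.com/ogaga555/discordpy-startup | discordbot.py | emoji
-- ===== SOURCE A (Python) =====
-- def emoji(number, category):
--     res = ''
--     for i in range(number):
--         if category == 'job':
--             res += ':briefcase: '
--         elif category == 'money':
--             res += ':moneybag: '
--         elif category == 'love':
--             res += ':heart: '
--         elif category == 'total':
--             res += ':star: '
--     return res
-- ===== SOURCE B (Python) =====
-- EMOJI = {
--     'job': ':briefcase: ',
--     'money': ':moneybag: ',
--     'love': ':heart: ',
--     'total': ':star: ',
-- }
--
--
-- def emoji(number, category):
--     return EMOJI.get(category, '') * number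
-- ===== Notes on version B (the rewrite author's own statement) =====
-- stated objective: simpler
-- what changed: Replaces the per-iteration branch chain and incremental concatenation with a one-time dict lookup of the category's emoji followed by a single string multiplication.
import Mathlib
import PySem

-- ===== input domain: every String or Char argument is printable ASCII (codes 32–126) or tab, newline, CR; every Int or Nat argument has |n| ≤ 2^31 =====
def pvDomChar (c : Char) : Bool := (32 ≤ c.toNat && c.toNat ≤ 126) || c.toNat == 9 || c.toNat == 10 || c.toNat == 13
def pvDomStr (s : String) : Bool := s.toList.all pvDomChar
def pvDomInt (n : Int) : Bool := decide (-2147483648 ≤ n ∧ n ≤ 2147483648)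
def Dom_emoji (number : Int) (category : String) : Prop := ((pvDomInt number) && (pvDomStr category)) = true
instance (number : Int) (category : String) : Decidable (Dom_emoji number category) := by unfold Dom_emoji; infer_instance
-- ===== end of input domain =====

-- B replaces A's per-iteration branch chain + incremental concatenation by one dict lookup and a single string multiplication (simpler).


-- ===== PORT A =====
-- literal port of A's loop: for i in range(number), an if/elif chain appending to res
def emoji (number : Int) (category : String) : String :=
  String.ofList ((PySem.List.pyRange 0 number 1).foldl
    (fun res _ =>
      if category == "job" then res ++ ":briefcase: ".toList
      else if category == "money" then res ++ ":moneybag: ".toList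
      else if category == "love" then res ++ ":heart: ".toList
      else if category == "total" then res ++ ":star: ".toList
      else res) [])

-- ===== PORT B =====
-- port of Source B: EMOJI.get(category, '') * number
def emojiDict : PySem.Dict String String :=
  PySem.Dict.ofList
    [("job", ":briefcase: "), ("money", ":moneybag: "),
     ("love", ":heart: "), ("total", ":star: ")]

def emoji_alt (number : Int) (category : String) : String :=
  String.ofList (PySem.List.pyRepeat (emojiDict.getD category "").toList number)

-- ===== PRECONDITION & SPEC =====
def Spec_emoji (number : Int) (category : String) (out : String) : Prop := out = emoji_alt number category
instance (number : Int) (category : String) (out : String) : Decidable (Spec_emoji number category out) := by unfold Spec_emoji; infer_instance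

-- ===== CLAIM (what is proved, stated in full; the proofs are below) =====
def Claim_equal_emoji : Prop := ∀ (number : Int) (category : String), Dom_emoji number category → Spec_emoji number category (emoji number category)

-- ===== LEMMAS AND PROOFS =====
-- A's loop appends a fixed chunk once per iteration: a fold with a constant append is the flattened replicate.
theorem foldl_const_append {α : Type} (l : List α) (u s : List Char) :
    l.foldl (fun r _ => r ++ u) s = s ++ (List.replicate l.length u).flatten := by
  induction l generalizing s with
  | nil => simp
  | cons a t ih => simp [List.foldl_cons, ih, List.replicate_succ, List.append_assoc]

theorem pyRepeat_eq_replicate (u : List Char) (n : Int) :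
    PySem.List.pyRepeat u n = (List.replicate n.toNat u).flatten := by
  simp [PySem.List.pyRepeat]

theorem emoji_eq_alt (number : Int) (category : String) :
    emoji number category = emoji_alt number category := by
  have he : emojiDict = PySem.Dict.mk
      [("job", ":briefcase: "), ("money", ":moneybag: "),
       ("love", ":heart: "), ("total", ":star: ")] := by decide
  unfold emoji emoji_alt
  by_cases h1 : category = "job"
  · subst h1
    simp [foldl_const_append, pyRepeat_eq_replicate, PySem.List.length_pyRange_one, he,
      PySem.Dict.getD, PySem.Dict.get?_mk_cons]
  · by_cases h2 : category = "money"
    · subst h2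
      simp [foldl_const_append, pyRepeat_eq_replicate, PySem.List.length_pyRange_one, he,
        PySem.Dict.getD, PySem.Dict.get?_mk_cons]
    · by_cases h3 : category = "love"
      · subst h3
        simp [foldl_const_append, pyRepeat_eq_replicate, PySem.List.length_pyRange_one, he,
          PySem.Dict.getD, PySem.Dict.get?_mk_cons]
      · by_cases h4 : category = "total"
        · subst h4
          simp [foldl_const_append, pyRepeat_eq_replicate, PySem.List.length_pyRange_one, he,
            PySem.Dict.getD, PySem.Dict.get?_mk_cons]
        · have hf : (fun (res : List Char) (_ : Int) =>
              if category == "job" then res ++ ":briefcase: ".toList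
              else if category == "money" then res ++ ":moneybag: ".toList
              else if category == "love" then res ++ ":heart: ".toList
              else if category == "total" then res ++ ":star: ".toList
              else res) = fun res _ => res := by
            funext res i
            simp [h1, h2, h3, h4]
          have hget : emojiDict.getD category "" = "" := by
            simp [he, PySem.Dict.getD, PySem.Dict.get?,
              Ne.symm h1, Ne.symm h2, Ne.symm h3, Ne.symm h4]
          rw [hf, hget]
          simp [pyRepeat_eq_replicate, List.foldl_fixed]

-- ===== VERDICT (by name: the statement is the Claim_ definition above) =====
theorem emoji_spec : Claim_equal_emoji := by
  intro number category _
  exact emoji_eq_alt number category
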